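-- pv_equiv track=rewrite | github.com/Tony-kurian/Tony-kurian | Category 2_Postprocessor.py | update_charges_table_data
-- ===== SOURCE A (Python) =====
-- def update_charges_table_data(table_data):
--     idx_to_remove = []
--     for idx,data in enumerate(table_data):
--         striped_values = [value.strip() for value in data.values()]
--         if any(x in striped_values[0].lower() for x in ['description', 'amount', 'balance forward', 'payment']):
--             idx_to_remove.append(idx)
--     table_data = [j for i, j in enumerate(table_data) if i not in idx_to_remove]
--     for idx, data in enumerate(table_data):
--         striped_values = [value.strip() for value in data.values()]
--         if any(x in striped_values[0].lower() for x in
--                ['water', 'nhcrwa fee', 'consumption', 'tceq', 'lsgwc', 'sjra', 'rwa fee', 'wtr swr svc fee',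
--                 'surface water', 'grp fee', 'whcrwa fee', 'nfbwa usage fee', 'reg assmt fee', 'security fee', 'wasw',
--                 'lsgcd']):
--             serviceType = "Water"
--             subServiceType = "Water"
--         elif any(x in striped_values[0].lower() for x in
--                  ['mtr chg 1"', 'sewer', 'incust surcharg', 'grease', 'grease trap']):
--             serviceType = "Water"
--             subServiceType = "Sewer"
--         elif any(x in striped_values[0].lower() for x in
--                  ['basic service', 'gas delivery', 'cost of gas', 'coga 0.5743', 'service rate', 'franchise fee']):
--             serviceType = "Natural gas"
--             subServiceType = "Natural gas"
--         elif any(x in striped_values[0].lower() for x in ['stormwater fee-com']):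
--             serviceType = "Water"
--             subServiceType = "Drainage"
--         elif any(x in striped_values[0].lower() for x in ['irrigation']):
--             serviceType = "Water"
--             subServiceType = "Irrigation"
--         else:
--             serviceType = ""
--             subServiceType = ""
--         data['2'] = serviceType
--         data['3'] = subServiceType
--
--     table_data.insert(0, {'0': 'c2des',  # charges_description_corpus_cristi
--                                                '1': 'c2cost',  # charges cost_corpus_cristi
--                                                '2': 'c2Serv',  # charges ServiceType_corpus_cristi
--                                                '3': 'c2subS'})  # charges subServiceType_corpus_cristi
--     return table_data
-- ===== SOURCE B (Python) =====
-- REMOVE_KEYWORDS = ['description', 'amount', 'balance forward', 'payment']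
--
-- RULES = [
--     (['water', 'nhcrwa fee', 'consumption', 'tceq', 'lsgwc', 'sjra', 'rwa fee', 'wtr swr svc fee',
--       'surface water', 'grp fee', 'whcrwa fee', 'nfbwa usage fee', 'reg assmt fee', 'security fee', 'wasw',
--       'lsgcd'], "Water", "Water"),
--     (['mtr chg 1"', 'sewer', 'incust surcharg', 'grease', 'grease trap'], "Water", "Sewer"),
--     (['basic service', 'gas delivery', 'cost of gas', 'coga 0.5743', 'service rate', 'franchise fee'],
--      "Natural gas", "Natural gas"),
--     (['stormwater fee-com'], "Water", "Drainage"),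
--     (['irrigation'], "Water", "Irrigation"),
-- ]
--
-- HEADER = {'0': 'c2des', '1': 'c2cost', '2': 'c2Serv', '3': 'c2subS'}
--
--
-- def update_charges_table_data(table_data):
--     out = [dict(HEADER)]
--     for data in table_data:
--         s = list(data.values())[0].strip().lower()
--         if any(k in s for k in REMOVE_KEYWORDS):
--             continue
--         serviceType, subServiceType = "", ""
--         for keywords, st, sub in RULES:
--             if any(k in s for k in keywords):
--                 serviceType, subServiceType = st, sub
--                 break
--         data['2'] = serviceType
--         data['3'] = subServiceType
--         out.append(data)
--     return out
-- ===== Notes on version B (the rewrite author's own statement) =====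
-- stated objective: alternative
-- what changed: B replaces A's two passes (collect indices to remove, then re-enumerate, filter and run an if/elif cascade per row) with a single pass that skips removal rows on the fly and categorizes by first match in an ordered (keywords, serviceType, subServiceType) rules table; the header row is prepended instead of inserted afterwards.
import Mathlib
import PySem

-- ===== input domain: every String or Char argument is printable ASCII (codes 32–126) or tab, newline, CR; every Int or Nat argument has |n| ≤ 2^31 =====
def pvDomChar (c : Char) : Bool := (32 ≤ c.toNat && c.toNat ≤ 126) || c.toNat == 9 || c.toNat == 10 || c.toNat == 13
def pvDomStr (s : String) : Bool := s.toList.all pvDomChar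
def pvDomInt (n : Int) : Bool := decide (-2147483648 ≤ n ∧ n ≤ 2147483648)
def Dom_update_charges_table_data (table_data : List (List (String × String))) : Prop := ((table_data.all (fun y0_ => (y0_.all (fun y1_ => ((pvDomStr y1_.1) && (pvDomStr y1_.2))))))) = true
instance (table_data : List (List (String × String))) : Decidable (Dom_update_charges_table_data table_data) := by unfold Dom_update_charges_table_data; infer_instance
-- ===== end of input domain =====

-- B fuses A's two passes into one and replaces the if/elif cascade by a first-match scan of an
-- ordered rules table (objective: simpler decomposition). Return-value equivalence only: the
-- Python originals both mutate the row dicts in place (data['2']/data['3']).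

-- ===== PORT A =====
def pvRemKwsA : List String := ["description", "amount", "balance forward", "payment"]
def pvWaterKwsA : List String := ["water", "nhcrwa fee", "consumption", "tceq", "lsgwc", "sjra", "rwa fee", "wtr swr svc fee", "surface water", "grp fee", "whcrwa fee", "nfbwa usage fee", "reg assmt fee", "security fee", "wasw", "lsgcd"]
def pvSewerKwsA : List String := ["mtr chg 1\"", "sewer", "incust surcharg", "grease", "grease trap"]
def pvGasKwsA : List String := ["basic service", "gas delivery", "cost of gas", "coga 0.5743", "service rate", "franchise fee"]
def pvStormKwsA : List String := ["stormwater fee-com"]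
def pvIrrKwsA : List String := ["irrigation"]

-- any(x in s for x in kws)
def pvAnyInA (kws : List String) (s : String) : Bool := kws.any (fun x => PySem.Str.isIn x s)

-- striped_values = [value.strip() for value in data.values()]; striped_values[0].lower()
-- (none = IndexError on an empty row; Pre_ excludes it, "" is a junk default there)
def pvFirstA (data : List (String × String)) : String :=
  match PySem.List.pyGet? (((PySem.Dict.ofList data).values).map PySem.Str.strip) 0 with
  | some v => PySem.Str.lower v
  | none => ""

def update_charges_table_data (table_data : List (List (String × String))) : List (List (String × String)) :=
  -- first loop: collect idx_to_remove
  let idx_to_remove : List Int :=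
    (PySem.List.enumerate table_data 0).foldl
      (fun acc p => if pvAnyInA pvRemKwsA (pvFirstA p.2) then acc ++ [p.1] else acc) []
  -- table_data = [j for i, j in enumerate(table_data) if i not in idx_to_remove]
  let table_data2 :=
    ((PySem.List.enumerate table_data 0).filter (fun p => !(idx_to_remove.contains p.1))).map (·.2)
  -- second loop: categorize (mutation of each row dict becomes a map)
  let rows := table_data2.map (fun data =>
    let s := pvFirstA data
    let st_sub : String × String :=
      if pvAnyInA pvWaterKwsA s then ("Water", "Water")
      else if pvAnyInA pvSewerKwsA s then ("Water", "Sewer")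
      else if pvAnyInA pvGasKwsA s then ("Natural gas", "Natural gas")
      else if pvAnyInA pvStormKwsA s then ("Water", "Drainage")
      else if pvAnyInA pvIrrKwsA s then ("Water", "Irrigation")
      else ("", "")
    (((PySem.Dict.ofList data).insert "2" st_sub.1).insert "3" st_sub.2).items)
  -- table_data.insert(0, {...})
  [("0", "c2des"), ("1", "c2cost"), ("2", "c2Serv"), ("3", "c2subS")] :: rows

-- ===== PORT B =====
def pvRemoveB : List String := ["description", "amount", "balance forward", "payment"]
def pvRulesB : List (List String × String × String) :=
  [(["water", "nhcrwa fee", "consumption", "tceq", "lsgwc", "sjra", "rwa fee", "wtr swr svc fee", "surface water", "grp fee", "whcrwa fee", "nfbwa usage fee", "reg assmt fee", "security fee", "wasw", "lsgcd"], "Water", "Water"),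
   (["mtr chg 1\"", "sewer", "incust surcharg", "grease", "grease trap"], "Water", "Sewer"),
   (["basic service", "gas delivery", "cost of gas", "coga 0.5743", "service rate", "franchise fee"], "Natural gas", "Natural gas"),
   (["stormwater fee-com"], "Water", "Drainage"),
   (["irrigation"], "Water", "Irrigation")]
def pvHeaderB : List (String × String) := [("0", "c2des"), ("1", "c2cost"), ("2", "c2Serv"), ("3", "c2subS")]

-- s = list(data.values())[0].strip().lower()  (none = IndexError on an empty row; Pre_ excludes it)
def pvFirstB (data : List (String × String)) : String :=
  match PySem.List.pyGet? ((PySem.Dict.ofList data).values) 0 with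
  | some v => PySem.Str.lower (PySem.Str.strip v)
  | none => ""

def update_charges_table_data_alt (table_data : List (List (String × String))) : List (List (String × String)) :=
  table_data.foldl
    (fun out data =>
      let s := pvFirstB data
      if pvRemoveB.any (fun k => PySem.Str.isIn k s) then out
      else
        let st_sub := ((pvRulesB.find? (fun r => r.1.any (fun k => PySem.Str.isIn k s))).map (·.2)).getD ("", "")
        out ++ [(((PySem.Dict.ofList data).insert "2" st_sub.1).insert "3" st_sub.2).items])
    [pvHeaderB]

-- ===== PRECONDITION & SPEC =====
-- Pre_ excludes inputs containing an empty row: there the Python A raises IndexError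
-- (striped_values[0] on an empty dict), so A returns on exactly the inputs Pre_ admits.
def Pre_update_charges_table_data (table_data : List (List (String × String))) : Prop :=
  ∀ row ∈ table_data, row ≠ []
instance (table_data : List (List (String × String))) : Decidable (Pre_update_charges_table_data table_data) := by unfold Pre_update_charges_table_data; infer_instance

def pvWitness_update_charges_table_data : (List (List (String × String))) :=
  [[("0", " Water Dist "), ("1", "7.50")], [("0", "Description"), ("1", "Amount")], [("0", "irrigation chg")]]

def Spec_update_charges_table_data (table_data : List (List (String × String))) (out : List (List (String × String))) : Prop := out = update_charges_table_data_alt table_data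
instance (table_data : List (List (String × String))) (out : List (List (String × String))) : Decidable (Spec_update_charges_table_data table_data out) := by unfold Spec_update_charges_table_data; infer_instance

-- ===== CLAIM (what is proved, stated in full; the proofs are below) =====
def Claim_equal_update_charges_table_data : Prop := ∀ (table_data : List (List (String × String))), Dom_update_charges_table_data table_data → Pre_update_charges_table_data table_data → Spec_update_charges_table_data table_data (update_charges_table_data table_data)

-- ===== LEMMAS AND PROOFS =====

-- the two ports read the same "first stripped lowered value" of a row
theorem pvFirst_eq (data : List (String × String)) : pvFirstA data = pvFirstB data := by
  unfold pvFirstA pvFirstB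
  cases h : (PySem.Dict.ofList data).values with
  | nil => simp [PySem.List.pyGet?, PySem.List.pyIdx?]
  | cons v vs => simp [PySem.List.pyGet?, PySem.List.pyIdx?]

-- the rules-table first match equals A's if/elif cascade
theorem pvRules_eq_cascade (s : String) :
    ((pvRulesB.find? (fun r => r.1.any (fun k => PySem.Str.isIn k s))).map (·.2)).getD ("", "") =
      (if pvAnyInA pvWaterKwsA s then (("Water" : String), ("Water" : String))
       else if pvAnyInA pvSewerKwsA s then ("Water", "Sewer")
       else if pvAnyInA pvGasKwsA s then ("Natural gas", "Natural gas")
       else if pvAnyInA pvStormKwsA s then ("Water", "Drainage")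
       else if pvAnyInA pvIrrKwsA s then ("Water", "Irrigation")
       else ("", "")) := by
  simp only [pvRulesB, pvAnyInA, pvWaterKwsA, pvSewerKwsA, pvGasKwsA, pvStormKwsA, pvIrrKwsA,
    List.find?]
  by_cases h1 : (["water", "nhcrwa fee", "consumption", "tceq", "lsgwc", "sjra", "rwa fee", "wtr swr svc fee", "surface water", "grp fee", "whcrwa fee", "nfbwa usage fee", "reg assmt fee", "security fee", "wasw", "lsgcd"] : List String).any (fun k => PySem.Str.isIn k s) = true <;>
  by_cases h2 : (["mtr chg 1\"", "sewer", "incust surcharg", "grease", "grease trap"] : List String).any (fun k => PySem.Str.isIn k s) = true <;>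
  by_cases h3 : (["basic service", "gas delivery", "cost of gas", "coga 0.5743", "service rate", "franchise fee"] : List String).any (fun k => PySem.Str.isIn k s) = true <;>
  by_cases h4 : (["stormwater fee-com"] : List String).any (fun k => PySem.Str.isIn k s) = true <;>
  by_cases h5 : (["irrigation"] : List String).any (fun k => PySem.Str.isIn k s) = true <;>
  simp only [h1, h2, h3, h4, h5, Option.map_some, Option.map_none, Option.getD_some,
    Option.getD_none, if_false, Bool.false_eq_true, if_pos]

-- B's fold is header-cons of the filtered, categorized rows
theorem alt_foldl (td : List (List (String × String))) (acc : List (List (String × String))) :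
    td.foldl
      (fun out data =>
        let s := pvFirstB data
        if pvRemoveB.any (fun k => PySem.Str.isIn k s) then out
        else
          let st_sub := ((pvRulesB.find? (fun r => r.1.any (fun k => PySem.Str.isIn k s))).map (·.2)).getD ("", "")
          out ++ [(((PySem.Dict.ofList data).insert "2" st_sub.1).insert "3" st_sub.2).items]) acc =
    acc ++ (td.filter (fun d => !(pvRemoveB.any (fun k => PySem.Str.isIn k (pvFirstB d))))).map
      (fun data =>
        let st_sub := ((pvRulesB.find? (fun r => r.1.any (fun k => PySem.Str.isIn k (pvFirstB data)))).map (·.2)).getD ("", "")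
        (((PySem.Dict.ofList data).insert "2" st_sub.1).insert "3" st_sub.2).items) := by
  induction td generalizing acc with
  | nil => simp
  | cons d td ih =>
    simp only [List.foldl_cons, List.filter_cons]
    by_cases h : (pvRemoveB.any fun k => PySem.Str.isIn k (pvFirstB d)) = true
    · simp only [h, Bool.not_true, reduceIte]
      exact ih acc
    · rw [Bool.not_eq_true] at h
      simp only [h, Bool.not_false, reduceIte, List.map_cons]
      rw [ih]
      simp

-- the filtered enumerate of A equals a direct filter
theorem enum_filter (td : List (List (String × String))) (s : Int) (I : List Int)
    (hI : ∀ p ∈ PySem.List.enumerate td s, I.contains p.1 = pvAnyInA pvRemKwsA (pvFirstA p.2)) :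
    ((PySem.List.enumerate td s).filter (fun p => !(I.contains p.1))).map (·.2) =
      td.filter (fun d => !(pvAnyInA pvRemKwsA (pvFirstA d))) := by
  induction td generalizing s with
  | nil => simp [PySem.List.enumerate_nil]
  | cons d td ih =>
    rw [PySem.List.enumerate_cons] at hI ⊢
    have hd : s ∈ I ↔ pvAnyInA pvRemKwsA (pvFirstA d) = true := by
      have := hI (s, d) (by simp)
      simp only [List.contains_eq_mem] at this
      constructor
      · intro hm; rw [← this]; simp [hm]
      · intro hm; have : decide (s ∈ I) = true := by rw [this, hm]
        simpa using this
    have htl : ∀ p ∈ PySem.List.enumerate td (s + 1),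
        I.contains p.1 = pvAnyInA pvRemKwsA (pvFirstA p.2) :=
      fun p hp => hI p (by simp [hp])
    have ih' := ih (s + 1) htl
    simp only [List.contains_eq_mem] at ih'
    by_cases h : pvAnyInA pvRemKwsA (pvFirstA d) = true <;>
      simp [hd, h, ih']

-- membership of an index in idx_to_remove decides the removal test of ITS row
theorem idx_mem (td : List (List (String × String))) (p : Int × List (String × String))
    (hp : p ∈ PySem.List.enumerate td 0) :
    (((PySem.List.enumerate td 0).filter (fun q => pvAnyInA pvRemKwsA (pvFirstA q.2))).map (·.1)).contains p.1 =
      pvAnyInA pvRemKwsA (pvFirstA p.2) := by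
  rw [PySem.List.mem_enumerate_iff] at hp
  obtain ⟨k, hk, rfl⟩ := hp
  by_cases h : pvAnyInA pvRemKwsA (pvFirstA td[k]) = true
  · simp only [h, List.contains_eq_mem, decide_eq_true_eq, List.mem_map, List.mem_filter]
    exact ⟨(0 + (k : Int), td[k]), ⟨(PySem.List.mem_enumerate_iff _ _ _).mpr ⟨k, hk, rfl⟩, h⟩, rfl⟩
  · simp only [h, List.contains_eq_mem, decide_eq_false_iff_not, List.mem_map, List.mem_filter]
    rintro ⟨q, ⟨hq, hrem⟩, hfst⟩
    rw [PySem.List.mem_enumerate_iff] at hq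
    obtain ⟨k', hk', rfl⟩ := hq
    have hkk : k' = k := by simp at hfst; exact_mod_cast hfst
    subst hkk
    exact h hrem

-- ===== VERDICT (by name: the statement is the Claim_ definition above) =====
theorem update_charges_table_data_spec : Claim_equal_update_charges_table_data := by
  intro td _ _
  show update_charges_table_data td = update_charges_table_data_alt td
  simp only [update_charges_table_data, update_charges_table_data_alt]
  rw [alt_foldl, PySem.List.foldl_append_if, List.nil_append]
  rw [enum_filter td 0 _ (idx_mem td)]
  have hfilt : (fun d => !(pvRemoveB.any fun k => PySem.Str.isIn k (pvFirstB d))) =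
      (fun d : List (String × String) => !(pvAnyInA pvRemKwsA (pvFirstA d))) :=
    funext fun d => by rw [← pvFirst_eq]; rfl
  rw [hfilt]
  refine congrArg₂ _ rfl ?_
  refine List.map_congr_left fun d _ => ?_
  rw [pvRules_eq_cascade, ← pvFirst_eq]
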